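-- pv_equiv track=rewrite | github.com/giriharan13/Asterisko | asterisko_LATEST.py | task_sheet
-- ===== SOURCE A (Python) =====
-- def task_sheet(users, dict_list, Tasks):
--     list_summary = [[":red_circle: \t\t\t\t :thumbsdown: " for i in range(len(users))] for j in range(len(Tasks))]
--     for i in range(len(users)):
--         for j in range(len(dict_list)):
--             if users[i] == dict_list[j][0]:
--                 for k in range(len(Tasks)):
--                     ti = Tasks.index((dict_list[j][1])[:-1])
--                     if (dict_list[j][1])[-1] == "T":
--                         list_summary[ti][i] = ":green_circle: \t\t\t\t :thumbsup: "
--                     if (dict_list[j][1])[-1] == "F":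
--                         list_summary[ti][i] = ":red_circle: \t\t\t\t :thumbsdown: "
--     return list_summary
-- ===== SOURCE B (Python) =====
-- def task_sheet(users, dict_list, Tasks):
--     GREEN = ":green_circle: \t\t\t\t :thumbsup: "
--     RED = ":red_circle: \t\t\t\t :thumbsdown: "
--     rows = {}
--     for r, t in enumerate(Tasks):
--         if t not in rows:
--             rows[t] = r
--     cols = {}
--     for c, u in enumerate(users):
--         cols.setdefault(u, []).append(c)
--     grid = [[RED] * len(users) for _ in Tasks]
--     for u, v in dict_list:
--         if u not in cols or not v:
--             continue
--         last = v[-1]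
--         if last != "T" and last != "F":
--             continue
--         r = rows.get(v[:-1])
--         if r is None:
--             continue
--         val = GREEN if last == "T" else RED
--         row = grid[r]
--         for c in cols[u]:
--             row[c] = val
--     return grid
-- ===== Notes on version B (the rewrite author's own statement) =====
-- stated objective: alternative
-- what changed: Replaces A's triple nested loop (users x entries x tasks, with a linear Tasks.index inside) by precomputed dicts task->first row and user->column list plus one single pass over dict_list writing each cell directly.
-- crash fix: On inputs with a non-empty Tasks list and some dict_list entry whose user is in users but whose value is empty or whose value minus its last character is not in Tasks, A raises (IndexError/ValueError from v[-1]/Tasks.index); B simply skips such entries and returns the grid. — e.g. on task_sheet(["a"], [("a", "xT")], ["y"]): A raises ValueError, B returns [[":red_circle: \t\t\t\t :thumbsdown: "]]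
import Mathlib
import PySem

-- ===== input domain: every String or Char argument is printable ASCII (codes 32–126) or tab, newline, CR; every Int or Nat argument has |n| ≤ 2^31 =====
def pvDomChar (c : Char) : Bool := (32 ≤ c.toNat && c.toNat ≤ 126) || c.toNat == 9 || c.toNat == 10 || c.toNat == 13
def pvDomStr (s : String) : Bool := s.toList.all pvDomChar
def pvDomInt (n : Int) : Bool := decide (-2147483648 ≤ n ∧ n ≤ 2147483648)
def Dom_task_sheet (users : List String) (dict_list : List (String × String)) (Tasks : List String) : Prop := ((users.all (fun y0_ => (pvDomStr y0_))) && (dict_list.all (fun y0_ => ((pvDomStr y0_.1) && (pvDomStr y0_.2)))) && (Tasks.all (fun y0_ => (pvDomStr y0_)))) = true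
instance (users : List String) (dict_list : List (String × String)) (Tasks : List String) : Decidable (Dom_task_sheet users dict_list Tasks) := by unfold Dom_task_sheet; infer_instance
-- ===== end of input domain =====

-- B replaces A's triple nested loop (users × entries × tasks with a linear Tasks.index inside) by
-- precomputed dicts task→first row / user→column list and ONE pass over dict_list (objective: alternative).

-- ===== PORT A =====
def pvRed : String := ":red_circle: \t\t\t\t :thumbsdown: "
def pvGreen : String := ":green_circle: \t\t\t\t :thumbsup: "

-- list_summary[ti][i] = v
def pvAset (g : List (List String)) (ti i : Nat) (v : String) : List (List String) :=
  g.set ti ((g.getD ti []).set i v)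

-- the body of A's k-loop (ti = Tasks.index(v[:-1]); the two 'if's on v[-1])
def pvAbody (Tasks : List String) (i : Nat) (p : String × String) (g : List (List String)) : List (List String) :=
  match PySem.List.index? Tasks (PySem.Str.slice p.2 none (some (-1))), PySem.Str.pyGet? p.2 (-1) with
  | some ti, some ch =>
      let g1 := if ch = 'T' then pvAset g ti i pvGreen else g
      if ch = 'F' then pvAset g1 ti i pvRed else g1
  | _, _ => g   -- here Python raises ValueError / IndexError; such inputs are excluded by Pre_

-- the body of A's j-loop: 'if users[i] == dict_list[j][0]: for k in range(len(Tasks)): …'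
def pvAentry (users Tasks : List String) (i : Nat) (g : List (List String)) (p : String × String) : List (List String) :=
  if users.getD i "" = p.1 then
    (List.range Tasks.length).foldl (fun g _ => pvAbody Tasks i p g) g
  else g

def task_sheet (users : List String) (dict_list : List (String × String)) (Tasks : List String) : List (List String) :=
  let init := (List.range Tasks.length).map (fun _ => (List.range users.length).map (fun _ => pvRed))
  (List.range users.length).foldl
    (fun g i => dict_list.foldl (fun g p => pvAentry users Tasks i g p) g) init

-- ===== PORT B =====
-- rows: task name -> its first row index (dict built with a first-wins insert)
def pvRowsOf (Tasks : List String) : PySem.Dict String Int :=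
  (PySem.List.enumerate Tasks 0).foldl
    (fun d rt => if d.contains rt.2 then d else d.insert rt.2 rt.1) PySem.Dict.empty

-- cols: user name -> list of its column indices
def pvColsOf (users : List String) : PySem.Dict String (List Int) :=
  (PySem.List.enumerate users 0).foldl
    (fun d cu => d.insert cu.2 (d.getD cu.2 [] ++ [cu.1])) PySem.Dict.empty

-- one dict_list entry of B's single pass
def pvBbody (rows : PySem.Dict String Int) (cols : PySem.Dict String (List Int))
    (g : List (List String)) (p : String × String) : List (List String) :=
  match cols.get? p.1 with
  | none => g
  | some cs =>
    if p.2 = "" then g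
    else
      match PySem.Str.pyGet? p.2 (-1) with
      | none => g  -- unreachable: p.2 ≠ ""
      | some last =>
        if last ≠ 'T' ∧ last ≠ 'F' then g
        else
          match rows.get? (PySem.Str.slice p.2 none (some (-1))) with
          | none => g
          | some r =>
            let val := if last = 'T' then pvGreen else pvRed
            g.set r.toNat (cs.foldl (fun row c => row.set c.toNat val) (g.getD r.toNat []))

def task_sheet_alt (users : List String) (dict_list : List (String × String)) (Tasks : List String) : List (List String) :=
  let rows := pvRowsOf Tasks
  let cols := pvColsOf users
  let grid0 := Tasks.map (fun _ => List.replicate users.length pvRed)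
  dict_list.foldl (fun g p => pvBbody rows cols g p) grid0

-- ===== PRECONDITION & SPEC =====
-- Pre_ excludes exactly the inputs where Python A raises: a non-empty Tasks list together with some
-- dict_list entry whose user occurs in users but whose value is empty (IndexError on v[-1]) or whose
-- value without its last character is not in Tasks (ValueError on Tasks.index).
def Pre_task_sheet (users : List String) (dict_list : List (String × String)) (Tasks : List String) : Prop :=
  Tasks = [] ∨ ∀ p ∈ dict_list, p.1 ∈ users →
    (p.2 ≠ "" ∧ PySem.Str.slice p.2 none (some (-1)) ∈ Tasks)
instance (users : List String) (dict_list : List (String × String)) (Tasks : List String) : Decidable (Pre_task_sheet users dict_list Tasks) := by unfold Pre_task_sheet; infer_instance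

def pvWitness_task_sheet : List String × (List (String × String)) × List String :=
  (["alice", "bob"], [("alice", "t1T"), ("bob", "t2F")], ["t1", "t2"])

-- On inputs with non-empty Tasks and a dict_list entry whose user is in users but whose value is empty
-- or whose value minus its last character is not in Tasks, A raises (IndexError/ValueError); B skips
-- such entries and returns the grid.
def Raises_task_sheet (users : List String) (dict_list : List (String × String)) (Tasks : List String) : Prop :=
  Tasks ≠ [] ∧ ∃ p ∈ dict_list, p.1 ∈ users ∧
    (p.2 = "" ∨ PySem.Str.slice p.2 none (some (-1)) ∉ Tasks)
instance (users : List String) (dict_list : List (String × String)) (Tasks : List String) : Decidable (Raises_task_sheet users dict_list Tasks) := by unfold Raises_task_sheet; infer_instance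

def pvRaiseWitness_task_sheet : List String × (List (String × String)) × List String :=
  (["a"], [("a", "xT")], ["y"])
def pvRaiseWitnessOut_task_sheet : List (List String) :=
  [[":red_circle: \t\t\t\t :thumbsdown: "]]

def Spec_task_sheet (users : List String) (dict_list : List (String × String)) (Tasks : List String) (out : List (List String)) : Prop := out = task_sheet_alt users dict_list Tasks
instance (users : List String) (dict_list : List (String × String)) (Tasks : List String) (out : List (List String)) : Decidable (Spec_task_sheet users dict_list Tasks out) := by unfold Spec_task_sheet; infer_instance

-- ===== CLAIM (what is proved, stated in full; the proofs are below) =====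
def Claim_equal_task_sheet : Prop := ∀ (users : List String) (dict_list : List (String × String)) (Tasks : List String), Dom_task_sheet users dict_list Tasks → Pre_task_sheet users dict_list Tasks → Spec_task_sheet users dict_list Tasks (task_sheet users dict_list Tasks)

def Claim_raises_task_sheet : Prop := (∀ (users : List String) (dict_list : List (String × String)) (Tasks : List String), Dom_task_sheet users dict_list Tasks → Raises_task_sheet users dict_list Tasks → ¬ Pre_task_sheet users dict_list Tasks) ∧ (Dom_task_sheet (pvRaiseWitness_task_sheet.1) (pvRaiseWitness_task_sheet.2.1) (pvRaiseWitness_task_sheet.2.2) ∧ Raises_task_sheet (pvRaiseWitness_task_sheet.1) (pvRaiseWitness_task_sheet.2.1) (pvRaiseWitness_task_sheet.2.2) ∧ task_sheet_alt (pvRaiseWitness_task_sheet.1) (pvRaiseWitness_task_sheet.2.1) (pvRaiseWitness_task_sheet.2.2) = pvRaiseWitnessOut_task_sheet)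

-- ===== LEMMAS AND PROOFS =====

def pvCell (g : List (List String)) (r c : Nat) : String := (g.getD r []).getD c ""

def pvGridOK (users Tasks : List String) (g : List (List String)) : Prop :=
  g.length = Tasks.length ∧ ∀ row ∈ g, row.length = users.length

lemma pv_getD_set {α} (l : List α) (i : Nat) (v : α) (c : Nat) (d : α) :
    (l.set i v).getD c d = if c = i ∧ i < l.length then v else l.getD c d := by
  simp only [List.getD_eq_getElem?_getD, List.getElem?_set]
  split_ifs with h1 h2 h3 h4 <;> simp_all

lemma pvAset_cell (g : List (List String)) (ti i : Nat) (v : String) (r c : Nat) :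
    pvCell (pvAset g ti i v) r c =
      if r = ti ∧ ti < g.length ∧ c = i ∧ i < (g.getD ti []).length then v
      else pvCell g r c := by
  unfold pvCell pvAset
  rw [pv_getD_set]
  by_cases h1 : r = ti ∧ ti < g.length
  · obtain ⟨h1a, h1b⟩ := h1; subst h1a
    rw [if_pos ⟨rfl, h1b⟩, pv_getD_set]
    by_cases h2 : c = i ∧ i < (g.getD r []).length
    · rw [if_pos h2, if_pos ⟨rfl, h1b, h2⟩]
    · rw [if_neg h2, if_neg (by tauto)]
  · rw [if_neg h1, if_neg (by tauto)]

lemma pvAset_len (g : List (List String)) (ti i : Nat) (v : String) :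
    (pvAset g ti i v).length = g.length := by
  unfold pvAset; simp

lemma pvAset_gridOK {users Tasks : List String} {g : List (List String)} (h : pvGridOK users Tasks g)
    (ti i : Nat) (v : String) : pvGridOK users Tasks (pvAset g ti i v) := by
  by_cases hti : ti < g.length
  · obtain ⟨h1, h2⟩ := h
    refine ⟨by rw [pvAset_len]; exact h1, ?_⟩
    intro row hrow
    rcases List.mem_or_eq_of_mem_set hrow with h | h
    · exact h2 _ h
    · subst h
      rw [List.length_set]
      exact h2 _ (by rw [List.getD_eq_getElem _ _ hti]; exact List.getElem_mem hti)
  · unfold pvAset; rw [List.set_eq_of_length_le (by omega)]; exact h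

lemma pvAset_idem (g : List (List String)) (ti i : Nat) (v : String) :
    pvAset (pvAset g ti i v) ti i v = pvAset g ti i v := by
  by_cases hti : ti < g.length
  · unfold pvAset
    rw [pv_getD_set, if_pos ⟨rfl, hti⟩, List.set_set, List.set_set]
  · have hg : ∀ row, g.set ti row = g := fun row => List.set_eq_of_length_le (by omega)
    unfold pvAset
    simp only [hg]

def pvHit (users Tasks : List String) (r c : Nat) (p : String × String) : Bool :=
  (users.getD c "" == p.1) &&
  (PySem.List.index? Tasks (PySem.Str.slice p.2 none (some (-1))) == some r) &&
  ((PySem.Str.pyGet? p.2 (-1) == some 'T') || (PySem.Str.pyGet? p.2 (-1) == some 'F'))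

def pvVal (p : String × String) : String :=
  if PySem.Str.pyGet? p.2 (-1) = some 'T' then pvGreen else pvRed

def pvStep (users Tasks : List String) (r c : Nat) (s : String) (p : String × String) : String :=
  if pvHit users Tasks r c p then pvVal p else s

lemma pvAbody_idem (Tasks : List String) (i : Nat) (p : String × String) (g : List (List String)) :
    pvAbody Tasks i p (pvAbody Tasks i p g) = pvAbody Tasks i p g := by
  unfold pvAbody
  rcases h1 : PySem.List.index? Tasks (PySem.Str.slice p.2 none (some (-1))) with _ | ti <;>
    rcases h2 : PySem.Str.pyGet? p.2 (-1) with _ | ch <;> simp only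
  by_cases hT : ch = 'T'
  · have hF : ¬ ch = 'F' := by subst hT; decide
    simp only [if_pos hT, if_neg hF, pvAset_idem]
  · by_cases hF : ch = 'F'
    · simp only [if_neg hT, if_pos hF, pvAset_idem]
    · simp only [if_neg hT, if_neg hF]

lemma pvAbody_gridOK {users Tasks : List String} {g : List (List String)} (h : pvGridOK users Tasks g)
    (i : Nat) (p : String × String) : pvGridOK users Tasks (pvAbody Tasks i p g) := by
  unfold pvAbody
  rcases h1 : PySem.List.index? Tasks (PySem.Str.slice p.2 none (some (-1))) with _ | ti <;>
    rcases h2 : PySem.Str.pyGet? p.2 (-1) with _ | ch <;> simp only <;> try exact h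
  split_ifs <;> first | exact h | exact pvAset_gridOK h _ _ _ | exact pvAset_gridOK (pvAset_gridOK h _ _ _) _ _ _

lemma pvAbody_cell {users Tasks : List String} {g : List (List String)} (hg : pvGridOK users Tasks g)
    {r c i : Nat} (hr : r < Tasks.length) (hc : c < users.length)
    (p : String × String) (hguard : users.getD i "" = p.1) :
    pvCell (pvAbody Tasks i p g) r c =
      if i = c then pvStep users Tasks r c (pvCell g r c) p else pvCell g r c := by
  obtain ⟨hgl, hgrow⟩ := hg
  unfold pvAbody pvStep pvHit
  rcases h1 : PySem.List.index? Tasks (PySem.Str.slice p.2 none (some (-1))) with _ | ti <;>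
    rcases h2 : PySem.Str.pyGet? p.2 (-1) with _ | ch <;> dsimp only
  · simp
  · simp
  · simp
  -- main case: some ti, some ch
  have hti : ti < Tasks.length := by
    obtain ⟨hk, -⟩ := PySem.List.getElem_of_index?_eq_some h1
    exact hk
  have htig : ti < g.length := by omega
  have hrowlen : (g.getD ti []).length = users.length := by
    rw [List.getD_eq_getElem _ _ htig]; exact hgrow _ (List.getElem_mem htig)
  have hvalT : ch = 'T' → pvVal p = pvGreen := by
    intro h; subst h; simp only [pvVal, h2]; simp
  have hvalF : ch = 'F' → pvVal p = pvRed := by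
    intro h; subst h; simp only [pvVal, h2]; decide
  by_cases hic : i = c
  · subst hic
    rw [if_pos rfl]
    have hhitpos : (ch = 'T' ∨ ch = 'F') → r = ti →
        (users.getD i "" == p.1 && some ti == some r && (some ch == some 'T' || some ch == some 'F')) = true := by
      intro hch hrt
      simp only [Bool.and_eq_true, Bool.or_eq_true, beq_iff_eq, Option.some.injEq]
      exact ⟨⟨hguard, hrt.symm⟩, hch⟩
    have hhitneg1 : ¬ r = ti →
        ¬ (users.getD i "" == p.1 && some ti == some r && (some ch == some 'T' || some ch == some 'F')) = true := by
      intro hrt hbad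
      simp only [Bool.and_eq_true, Bool.or_eq_true, beq_iff_eq, Option.some.injEq] at hbad
      exact hrt hbad.1.2.symm
    have hhitneg2 : ¬ ch = 'T' → ¬ ch = 'F' →
        ¬ (users.getD i "" == p.1 && some ti == some r && (some ch == some 'T' || some ch == some 'F')) = true := by
      intro hT hF hbad
      simp only [Bool.and_eq_true, Bool.or_eq_true, beq_iff_eq, Option.some.injEq] at hbad
      rcases hbad.2 with h | h
      · exact hT h
      · exact hF h
    by_cases hchF : ch = 'F'
    · have hne : ¬ ch = 'T' := by rw [hchF]; decide
      rw [if_pos hchF, if_neg hne, pvAset_cell]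
      by_cases hrt : r = ti
      · rw [if_pos ⟨hrt, htig, rfl, by omega⟩, if_pos (hhitpos (Or.inr hchF) hrt), hvalF hchF]
      · rw [if_neg (by tauto), if_neg (hhitneg1 hrt)]
    · by_cases hchT : ch = 'T'
      · rw [if_neg hchF, if_pos hchT, pvAset_cell]
        by_cases hrt : r = ti
        · rw [if_pos ⟨hrt, htig, rfl, by omega⟩, if_pos (hhitpos (Or.inl hchT) hrt), hvalT hchT]
        · rw [if_neg (by tauto), if_neg (hhitneg1 hrt)]
      · rw [if_neg hchF, if_neg hchT, if_neg (hhitneg2 hchT hchF)]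
  · have hic' : ¬ c = i := fun h => hic h.symm
    rw [if_neg hic]
    split_ifs with hF hT hT
    · rw [pvAset_cell, if_neg (by tauto), pvAset_cell, if_neg (by tauto)]
    · rw [pvAset_cell, if_neg (by tauto)]
    · rw [pvAset_cell, if_neg (by tauto)]
    · rfl

lemma pv_foldl_pres {α β} (P : α → Prop) (f : α → β → α) (h : ∀ a b, P a → P (f a b)) :
    ∀ (l : List β) (a : α), P a → P (l.foldl f a) := by
  intro l
  induction l with
  | nil => intro a ha; exact ha
  | cons b l ih => intro a ha; exact ih _ (h a b ha)

lemma pv_foldl_range_idem {α} (F : α → α) (hF : ∀ x, F (F x) = F x) :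
    ∀ (n : Nat), 0 < n → ∀ (x : α), (List.range n).foldl (fun a _ => F a) x = F x := by
  intro n
  induction n with
  | zero => omega
  | succ n ih =>
    intro _ x
    rw [List.range_succ, List.foldl_append]
    rcases Nat.eq_zero_or_pos n with h | h
    · subst h; simp
    · rw [ih h]; simp [hF]

lemma pvHit_false_of_user {users Tasks : List String} {r c : Nat} {p : String × String}
    (h : ¬ users.getD c "" = p.1) : pvHit users Tasks r c p = false := by
  unfold pvHit
  rw [show (users.getD c "" == p.1) = false from beq_eq_false_iff_ne.mpr h]
  simp

lemma pvStep_of_hit_false {users Tasks : List String} {r c : Nat} {p : String × String}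
    (h : pvHit users Tasks r c p = false) (s : String) : pvStep users Tasks r c s p = s := by
  unfold pvStep; simp [h]

lemma pvAentry_gridOK {users Tasks : List String} {g : List (List String)} (hg : pvGridOK users Tasks g)
    (i : Nat) (p : String × String) : pvGridOK users Tasks (pvAentry users Tasks i g p) := by
  unfold pvAentry
  split_ifs
  · exact pv_foldl_pres (pvGridOK users Tasks) (fun g _ => pvAbody Tasks i p g)
      (fun a _ ha => pvAbody_gridOK ha i p) _ _ hg
  · exact hg

lemma pvAentry_cell {users Tasks : List String} {g : List (List String)} (hg : pvGridOK users Tasks g)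
    {r c i : Nat} (hr : r < Tasks.length) (hc : c < users.length)
    (p : String × String) :
    pvCell (pvAentry users Tasks i g p) r c =
      if i = c then pvStep users Tasks r c (pvCell g r c) p else pvCell g r c := by
  unfold pvAentry
  by_cases hguard : users.getD i "" = p.1
  · rw [if_pos hguard,
      pv_foldl_range_idem (pvAbody Tasks i p) (pvAbody_idem Tasks i p) _ (by omega)]
    exact pvAbody_cell ⟨hg.1, hg.2⟩ hr hc p hguard
  · rw [if_neg hguard]
    by_cases hic : i = c
    · subst hic
      rw [if_pos rfl, pvStep_of_hit_false (pvHit_false_of_user hguard)]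
    · rw [if_neg hic]

lemma pvAcol_gridOK {users Tasks : List String} {g : List (List String)} (hg : pvGridOK users Tasks g)
    (i : Nat) (dl : List (String × String)) :
    pvGridOK users Tasks (dl.foldl (fun g p => pvAentry users Tasks i g p) g) :=
  pv_foldl_pres (pvGridOK users Tasks) (fun g p => pvAentry users Tasks i g p)
    (fun a b ha => pvAentry_gridOK ha i b) dl g hg

lemma pvAcol_cell {users Tasks : List String} {r c i : Nat}
    (hr : r < Tasks.length) (hc : c < users.length) :
    ∀ (dl : List (String × String)) (g : List (List String)), pvGridOK users Tasks g →
    pvCell (dl.foldl (fun g p => pvAentry users Tasks i g p) g) r c =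
      if i = c then dl.foldl (pvStep users Tasks r c) (pvCell g r c) else pvCell g r c := by
  intro dl
  induction dl with
  | nil => intro g hg; simp
  | cons p dl ih =>
    intro g hg
    simp only [List.foldl_cons]
    rw [ih _ (pvAentry_gridOK hg i p), pvAentry_cell hg hr hc p]
    by_cases hic : i = c <;> simp [hic]

lemma pvFold_keep {users Tasks : List String} {r c : Nat} :
    ∀ (dl : List (String × String)), (∀ p ∈ dl, pvHit users Tasks r c p = false) →
    ∀ (s : String), dl.foldl (pvStep users Tasks r c) s = s := by
  intro dl
  induction dl with
  | nil => intro _ s; rfl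
  | cons p dl ih =>
    intro h s
    simp only [List.foldl_cons]
    rw [pvStep_of_hit_false (h p List.mem_cons_self) s]
    exact ih (fun q hq => h q (List.mem_cons_of_mem _ hq)) s

lemma pvFold_const {users Tasks : List String} {r c : Nat} :
    ∀ (dl : List (String × String)), (∃ p ∈ dl, pvHit users Tasks r c p = true) →
    ∀ (x y : String), dl.foldl (pvStep users Tasks r c) x = dl.foldl (pvStep users Tasks r c) y := by
  intro dl
  induction dl with
  | nil => rintro ⟨p, hp, -⟩; exact absurd hp (List.not_mem_nil)
  | cons p dl ih =>
    rintro ⟨q, hq, hhit⟩ x y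
    simp only [List.foldl_cons]
    by_cases hph : pvHit users Tasks r c p = true
    · simp [pvStep, hph]
    · rcases List.mem_cons.mp hq with h | h
      · subst h; exact absurd hhit hph
      · exact ih ⟨q, h, hhit⟩ _ _

lemma pvFold_idem {users Tasks : List String} {r c : Nat} (dl : List (String × String)) (x : String) :
    dl.foldl (pvStep users Tasks r c) (dl.foldl (pvStep users Tasks r c) x) =
      dl.foldl (pvStep users Tasks r c) x := by
  by_cases h : ∃ p ∈ dl, pvHit users Tasks r c p = true
  · exact pvFold_const dl h _ _
  · have h' : ∀ p ∈ dl, pvHit users Tasks r c p = false := by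
      intro p hp
      cases hb : pvHit users Tasks r c p
      · rfl
      · exact absurd ⟨p, hp, hb⟩ h
    rw [pvFold_keep dl h', pvFold_keep dl h']

lemma pvAouter_cell {users Tasks : List String} {dl : List (String × String)} {r c : Nat}
    (hr : r < Tasks.length) (hc : c < users.length) :
    ∀ (L : List Nat) (g : List (List String)), pvGridOK users Tasks g →
    pvCell (L.foldl (fun g i => dl.foldl (fun g p => pvAentry users Tasks i g p) g) g) r c =
      if c ∈ L then dl.foldl (pvStep users Tasks r c) (pvCell g r c) else pvCell g r c := by
  intro L
  induction L with
  | nil => intro g hg; simp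
  | cons i L ih =>
    intro g hg
    simp only [List.foldl_cons]
    rw [ih _ (pvAcol_gridOK hg i dl), pvAcol_cell hr hc dl g hg]
    by_cases hcL : c ∈ L
    · rw [if_pos hcL, if_pos (List.mem_cons.mpr (Or.inr hcL))]
      by_cases hic : i = c
      · rw [if_pos hic, pvFold_idem]
      · rw [if_neg hic]
    · rw [if_neg hcL]
      by_cases hic : i = c
      · rw [if_pos hic, if_pos (List.mem_cons.mpr (Or.inl hic.symm))]
      · rw [if_neg hic, if_neg (by
          intro hmem
          rcases List.mem_cons.mp hmem with h | h
          · exact hic h.symm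
          · exact hcL h)]

def pvInit (users Tasks : List String) : List (List String) :=
  (List.range Tasks.length).map (fun _ => (List.range users.length).map (fun _ => pvRed))

lemma pvInit_gridOK (users Tasks : List String) : pvGridOK users Tasks (pvInit users Tasks) := by
  constructor
  · simp [pvInit]
  · intro row hrow
    simp only [pvInit, List.mem_map] at hrow
    obtain ⟨_, -, h⟩ := hrow
    rw [← h]; simp

lemma pvInit_cell {users Tasks : List String} {r c : Nat} (hr : r < Tasks.length) (hc : c < users.length) :
    pvCell (pvInit users Tasks) r c = pvRed := by
  simp [pvCell, pvInit, List.getD_eq_getElem?_getD, hr, hc]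

def pvSpecGrid (users : List String) (dict_list : List (String × String)) (Tasks : List String) : List (List String) :=
  (List.range Tasks.length).map (fun r =>
    (List.range users.length).map (fun c => dict_list.foldl (pvStep users Tasks r c) pvRed))

lemma pv_cell_eq_getElem {g : List (List String)} {r c : Nat} (hr : r < g.length)
    (hc : c < g[r].length) : pvCell g r c = g[r][c] := by
  unfold pvCell
  rw [List.getD_eq_getElem _ _ hr, List.getD_eq_getElem _ _ hc]

lemma pvLA (users : List String) (dict_list : List (String × String)) (Tasks : List String) :
    task_sheet users dict_list Tasks = pvSpecGrid users dict_list Tasks := by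
  have hts : task_sheet users dict_list Tasks =
      (List.range users.length).foldl
        (fun g i => dict_list.foldl (fun g p => pvAentry users Tasks i g p) g)
        (pvInit users Tasks) := rfl
  rw [hts]
  have hok : pvGridOK users Tasks
      ((List.range users.length).foldl
        (fun g i => dict_list.foldl (fun g p => pvAentry users Tasks i g p) g)
        (pvInit users Tasks)) :=
    pv_foldl_pres (pvGridOK users Tasks) _
      (fun a b ha => pvAcol_gridOK ha b dict_list) _ _ (pvInit_gridOK users Tasks)
  apply List.ext_getElem
  · rw [hok.1]; simp [pvSpecGrid]
  · intro r hr1 hr2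
    have hrT : r < Tasks.length := hok.1 ▸ hr1
    have hrowlen := hok.2 _ (List.getElem_mem hr1)
    apply List.ext_getElem
    · rw [hrowlen]; simp [pvSpecGrid, hrT]
    · intro c hc1 hc2
      have hcU : c < users.length := hrowlen ▸ hc1
      rw [← pv_cell_eq_getElem hr1 hc1,
        pvAouter_cell hrT hcU (List.range users.length) _ (pvInit_gridOK users Tasks),
        if_pos (List.mem_range.mpr hcU), pvInit_cell hrT hcU]
      simp [pvSpecGrid]

lemma pvRows_fold (Ts : List String) : ∀ (s : Int) (d : PySem.Dict String Int) (t : String),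
    ((PySem.List.enumerate Ts s).foldl
      (fun d rt => if d.contains rt.2 then d else d.insert rt.2 rt.1) d).get? t
    = if d.contains t then d.get? t
      else (PySem.List.index? Ts t).map (fun n => s + (n : Int)) := by
  induction Ts with
  | nil =>
    intro s d t
    rw [PySem.List.enumerate_nil]
    simp only [List.foldl_nil, PySem.List.index?_eq_idxOf?]
    by_cases hc : d.contains t
    · rw [if_pos hc]
    · rw [if_neg hc]
      simp [(PySem.Dict.get?_eq_none_iff_contains d t).mpr (by simpa using hc)]
  | cons t0 Ts ih =>
    intro s d t
    rw [PySem.List.enumerate_cons]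
    simp only [List.foldl_cons]
    rw [ih]
    by_cases ht : t = t0
    · subst ht
      by_cases hc : d.contains t
      · rw [if_pos (by simp [hc]), if_pos hc, if_pos hc]
      · rw [if_neg hc, if_pos (by simp [hc, PySem.Dict.contains_insert_self]),
          if_neg (by simp [hc]), PySem.Dict.get?_insert_self,
          PySem.List.index?_cons_self]
        simp
    · have hne : ¬ (t0 = t) := fun h => ht h.symm
      rw [PySem.List.index?_cons_of_ne _ hne]
      by_cases hc : d.contains t0
      · rw [if_pos hc]
        by_cases hct : d.contains t
        · rw [if_pos hct, if_pos hct]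
        · rw [if_neg hct, if_neg hct]
          cases PySem.List.index? Ts t <;> simp <;> omega
      · rw [if_neg hc]
        have hcont : (d.insert t0 s).contains t = d.contains t := by
          rw [PySem.Dict.contains_insert]
          simp [ht]
        by_cases hct : d.contains t
        · rw [if_pos (by rw [hcont]; exact hct), if_pos hct,
            PySem.Dict.get?_insert_of_ne _ _ ht]
        · rw [if_neg (by rw [hcont]; simpa using hct), if_neg hct]
          cases PySem.List.index? Ts t <;> simp <;> omega

lemma pvRows_get (Tasks : List String) (t : String) :
    (pvRowsOf Tasks).get? t = (PySem.List.index? Tasks t).map (fun n => (n : Int)) := by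
  unfold pvRowsOf
  rw [pvRows_fold Tasks 0 PySem.Dict.empty t, if_neg (by simp)]
  cases PySem.List.index? Tasks t <;> simp

lemma pvCols_fold_contains (us : List String) : ∀ (s : Int) (d : PySem.Dict String (List Int)) (u : String),
    ((PySem.List.enumerate us s).foldl
      (fun d cu => d.insert cu.2 (d.getD cu.2 [] ++ [cu.1])) d).contains u
    = (d.contains u || decide (u ∈ us)) := by
  induction us with
  | nil =>
    intro s d u
    rw [PySem.List.enumerate_nil]
    simp
  | cons u0 us ih =>
    intro s d u
    rw [PySem.List.enumerate_cons]
    simp only [List.foldl_cons]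
    rw [ih]
    rw [PySem.Dict.contains_insert]
    simp only [List.mem_cons]
    by_cases h : u = u0 <;> simp [h, Bool.or_comm, Bool.or_assoc, Bool.or_left_comm]

lemma pvCols_fold_getD (us : List String) : ∀ (s : Int) (d : PySem.Dict String (List Int)) (u : String),
    ((PySem.List.enumerate us s).foldl
      (fun d cu => d.insert cu.2 (d.getD cu.2 [] ++ [cu.1])) d).getD u []
    = d.getD u [] ++ (PySem.List.enumerate us s).filterMap
        (fun cu => if cu.2 = u then some cu.1 else none) := by
  induction us with
  | nil =>
    intro s d u
    rw [PySem.List.enumerate_nil]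
    simp
  | cons u0 us ih =>
    intro s d u
    rw [PySem.List.enumerate_cons]
    simp only [List.foldl_cons, List.filterMap_cons]
    rw [ih]
    rw [PySem.Dict.getD_insert]
    by_cases h : u = u0
    · subst h
      rw [if_pos rfl]
      simp
    · rw [if_neg h, if_neg (fun hh => h hh.symm)]

lemma pvCols_get_none {users : List String} {u : String}
    (h : (pvColsOf users).get? u = none) : u ∉ users := by
  have hc := pvCols_fold_contains users 0 PySem.Dict.empty u
  unfold pvColsOf at h
  rw [PySem.Dict.contains_eq_isSome_get?, h] at hc
  simp at hc
  exact hc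

lemma pvCols_get_some {users : List String} {u : String} {cs : List Int}
    (h : (pvColsOf users).get? u = some cs) :
    cs = (PySem.List.enumerate users 0).filterMap
        (fun cu => if cu.2 = u then some cu.1 else none) := by
  have hg := pvCols_fold_getD users 0 PySem.Dict.empty u
  unfold pvColsOf at h
  rw [PySem.Dict.getD_eq_get?_getD, h] at hg
  simpa using hg

lemma pvCols_mem {users : List String} {u : String} {cs : List Int}
    (h : (pvColsOf users).get? u = some cs) (c : Nat) :
    ((c : Int) ∈ cs ∧ c < users.length) ↔ (c < users.length ∧ users.getD c "" = u) := by
  rw [pvCols_get_some h]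
  simp only [List.mem_filterMap, PySem.List.mem_enumerate_iff]
  constructor
  · rintro ⟨⟨q, ⟨k, hk, rfl⟩, hq⟩, hcU⟩
    by_cases hqu : users[k] = u
    · rw [if_pos hqu] at hq
      simp only [Option.some.injEq] at hq
      have : (k : Int) = c := by omega
      have hkc : k = c := by omega
      subst hkc
      exact ⟨hk, by rw [List.getD_eq_getElem _ _ hk]; exact hqu⟩
    · rw [if_neg hqu] at hq
      exact absurd hq (by simp)
  · rintro ⟨hcU, hu⟩
    refine ⟨⟨((0 : Int) + (c : Int), users[c]), ⟨c, hcU, rfl⟩, ?_⟩, hcU⟩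
    rw [if_pos (by rw [List.getD_eq_getElem _ _ hcU] at hu; exact hu)]
    simp

lemma pvCols_nonneg {users : List String} {u : String} {cs : List Int}
    (h : (pvColsOf users).get? u = some cs) : ∀ ci ∈ cs, 0 ≤ ci ∧ ci < (users.length : Int) := by
  intro ci hci
  rw [pvCols_get_some h] at hci
  simp only [List.mem_filterMap, PySem.List.mem_enumerate_iff] at hci
  obtain ⟨q, ⟨k, hk, rfl⟩, hq⟩ := hci
  by_cases hqu : users[k] = u
  · rw [if_pos hqu] at hq
    simp only [Option.some.injEq] at hq
    omega
  · rw [if_neg hqu] at hq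
    exact absurd hq (by simp)

lemma pvRowfold_len (val : String) : ∀ (cs : List Int) (row : List String),
    (cs.foldl (fun row ci => row.set ci.toNat val) row).length = row.length := by
  intro cs
  induction cs with
  | nil => intro row; rfl
  | cons ci cs ih => intro row; simp only [List.foldl_cons]; rw [ih, List.length_set]

lemma pvRowfold_cell (val : String) : ∀ (cs : List Int) (row : List String) (c : Nat),
    (cs.foldl (fun row ci => row.set ci.toNat val) row).getD c "" =
      if ∃ ci ∈ cs, ci.toNat = c ∧ c < row.length then val else row.getD c "" := by
  intro cs
  induction cs with
  | nil =>
    intro row c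
    simp
  | cons ci cs ih =>
    intro row c
    simp only [List.foldl_cons]
    rw [ih, pv_getD_set]
    by_cases hex : ∃ ci' ∈ cs, ci'.toNat = c ∧ c < row.length
    · rw [if_pos (by simpa [List.length_set] using hex),
        if_pos (by rcases hex with ⟨x, hx, h1, h2⟩; exact ⟨x, List.mem_cons_of_mem _ hx, h1, h2⟩)]
    · rw [if_neg (by simpa [List.length_set] using hex)]
      by_cases hhd : c = ci.toNat ∧ ci.toNat < row.length
      · rw [if_pos hhd, if_pos ⟨ci, List.mem_cons_self, hhd.1.symm, by omega⟩]
      · rw [if_neg hhd, if_neg (by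
          rintro ⟨x, hx, h1, h2⟩
          rcases List.mem_cons.mp hx with h | h
          · subst h; exact hhd ⟨h1.symm, by omega⟩
          · exact hex ⟨x, h, h1, h2⟩)]

lemma pvHit_false_of_idx {users Tasks : List String} {r c : Nat} {p : String × String}
    (h : ¬ PySem.List.index? Tasks (PySem.Str.slice p.2 none (some (-1))) = some r) :
    pvHit users Tasks r c p = false := by
  unfold pvHit
  rw [show (PySem.List.index? Tasks (PySem.Str.slice p.2 none (some (-1))) == some r) = false by
    simpa using h]
  simp

lemma pvHit_false_of_ch {users Tasks : List String} {r c : Nat} {p : String × String}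
    (h : ¬ (PySem.Str.pyGet? p.2 (-1) = some 'T' ∨ PySem.Str.pyGet? p.2 (-1) = some 'F')) :
    pvHit users Tasks r c p = false := by
  unfold pvHit
  rw [show ((PySem.Str.pyGet? p.2 (-1) == some 'T') || (PySem.Str.pyGet? p.2 (-1) == some 'F')) = false by
    simpa using (by push_neg at h; exact h)]
  simp

lemma pvBbody_gridOK {users Tasks : List String} {g : List (List String)}
    (hg : pvGridOK users Tasks g) (p : String × String) :
    pvGridOK users Tasks (pvBbody (pvRowsOf Tasks) (pvColsOf users) g p) := by
  unfold pvBbody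
  rcases h0 : (pvColsOf users).get? p.1 with _ | cs
  · exact hg
  dsimp only
  by_cases h1 : p.2 = ""
  · rw [if_pos h1]; exact hg
  rw [if_neg h1]
  rcases h2 : PySem.Str.pyGet? p.2 (-1) with _ | last
  · exact hg
  dsimp only
  by_cases h3 : last ≠ 'T' ∧ last ≠ 'F'
  · rw [if_pos h3]; exact hg
  rw [if_neg h3]
  rcases h4 : (pvRowsOf Tasks).get? (PySem.Str.slice p.2 none (some (-1))) with _ | rI
  · exact hg
  dsimp only
  by_cases hin : rI.toNat < g.length
  · obtain ⟨hl, hrows⟩ := hg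
    refine ⟨by rw [List.length_set]; exact hl, ?_⟩
    intro row hrow
    rcases List.mem_or_eq_of_mem_set hrow with h | h
    · exact hrows _ h
    · subst h
      rw [pvRowfold_len, List.getD_eq_getElem _ _ hin]
      exact hrows _ (List.getElem_mem hin)
  · rw [List.set_eq_of_length_le (by omega)]
    exact hg

lemma pvBbody_cell {users Tasks : List String} {g : List (List String)}
    (hg : pvGridOK users Tasks g) {r c : Nat}
    (hr : r < Tasks.length) (hc : c < users.length) (p : String × String) :
    pvCell (pvBbody (pvRowsOf Tasks) (pvColsOf users) g p) r c =
      pvStep users Tasks r c (pvCell g r c) p := by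
  obtain ⟨hgl, hgrow⟩ := hg
  have hcu : users.getD c "" = users[c] := List.getD_eq_getElem _ _ hc
  unfold pvBbody
  rcases h0 : (pvColsOf users).get? p.1 with _ | cs
  · -- p.1 not a user: no column matches
    rw [pvStep_of_hit_false (pvHit_false_of_user (by
      rw [hcu]; intro h; exact pvCols_get_none h0 (h ▸ List.getElem_mem hc)))]
  dsimp only
  by_cases h1 : p.2 = ""
  · -- empty value: v[-1] is none
    rw [if_pos h1, pvStep_of_hit_false (pvHit_false_of_ch (by rw [h1]; decide))]
  rw [if_neg h1]
  rcases h2 : PySem.Str.pyGet? p.2 (-1) with _ | last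
  · rw [pvStep_of_hit_false (pvHit_false_of_ch (by rw [h2]; simp))]
  dsimp only
  by_cases h3 : last ≠ 'T' ∧ last ≠ 'F'
  · rw [if_pos h3, pvStep_of_hit_false (pvHit_false_of_ch (by rw [h2]; simp only [Option.some.injEq]; tauto))]
  rw [if_neg h3]
  rcases h4 : (pvRowsOf Tasks).get? (PySem.Str.slice p.2 none (some (-1))) with _ | rI
  · -- task name not found: index? is none
    rw [pvStep_of_hit_false (pvHit_false_of_idx (by
      rw [pvRows_get] at h4
      intro h
      rw [h] at h4
      simp at h4))]
  dsimp only
  -- found: rI is the cast of the index? value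
  rw [pvRows_get] at h4
  rcases hidx : PySem.List.index? Tasks (PySem.Str.slice p.2 none (some (-1))) with _ | ti
  · rw [hidx] at h4; simp at h4
  rw [hidx] at h4
  simp at h4
  have hti : ti < Tasks.length := by
    obtain ⟨hk, -⟩ := PySem.List.getElem_of_index?_eq_some hidx
    exact hk
  have htig : ti < g.length := by omega
  have hrI : rI.toNat = ti := by omega
  have hrowlen : (g.getD ti []).length = users.length := by
    rw [List.getD_eq_getElem _ _ htig]; exact hgrow _ (List.getElem_mem htig)
  have hlast : last = 'T' ∨ last = 'F' := by
    by_cases hT : last = 'T'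
    · exact Or.inl hT
    · right
      rcases not_and_or.mp h3 with h | h
      · exact absurd hT (by simpa using h)
      · simpa using h
  unfold pvCell
  rw [hrI, pv_getD_set]
  unfold pvStep pvHit pvVal
  rw [h2, hidx]
  by_cases hrt : r = ti
  · subst hrt
    rw [if_pos ⟨rfl, htig⟩, pvRowfold_cell]
    by_cases hu : users.getD c "" = p.1
    · have hex : ∃ ci ∈ cs, ci.toNat = c ∧ c < (g.getD r []).length :=
        ⟨(c : Int), ((pvCols_mem h0 c).mpr ⟨hc, hu⟩).1, by simp, by omega⟩
      rcases hlast with h | h <;> subst h <;> rw [if_pos hex] <;> simp [hu] <;>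
        (rw [List.getD_eq_getElem?_getD] at hu; intro hbad; exact absurd hu hbad)
    · have hnex : ¬ ∃ ci ∈ cs, ci.toNat = c ∧ c < (g.getD r []).length := by
        rintro ⟨ci, hci, hcieq, hclen⟩
        have h01 := (pvCols_nonneg h0) ci hci
        have hceq : ci = (c : Int) := by omega
        subst hceq
        exact hu ((pvCols_mem h0 c).mp ⟨hci, hc⟩).2
      rw [if_neg hnex]
      simp only [List.getD_eq_getElem?_getD] at hu
      simp [hu]
  · rw [if_neg (by tauto),
      if_neg (by
        simp only [Bool.and_eq_true, Bool.or_eq_true, beq_iff_eq, Option.some.injEq]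
        intro hbad
        exact hrt hbad.1.2.symm)]

lemma pvBfold_cell {users Tasks : List String} {r c : Nat}
    (hr : r < Tasks.length) (hc : c < users.length) :
    ∀ (dl : List (String × String)) (g : List (List String)), pvGridOK users Tasks g →
    pvCell (dl.foldl (fun g p => pvBbody (pvRowsOf Tasks) (pvColsOf users) g p) g) r c =
      dl.foldl (pvStep users Tasks r c) (pvCell g r c) := by
  intro dl
  induction dl with
  | nil => intro g hg; rfl
  | cons p dl ih =>
    intro g hg
    simp only [List.foldl_cons]
    rw [ih _ (pvBbody_gridOK hg p), pvBbody_cell hg hr hc p]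

lemma pvGrid0_gridOK (users Tasks : List String) :
    pvGridOK users Tasks (Tasks.map (fun _ => List.replicate users.length pvRed)) := by
  constructor
  · simp
  · intro row hrow
    simp only [List.mem_map] at hrow
    obtain ⟨_, -, h⟩ := hrow
    rw [← h]; simp

lemma pvGrid0_cell {users Tasks : List String} {r c : Nat} (hr : r < Tasks.length) (hc : c < users.length) :
    pvCell (Tasks.map (fun _ => List.replicate users.length pvRed)) r c = pvRed := by
  simp [pvCell, List.getD_eq_getElem?_getD, hr, hc]

lemma pvLB (users : List String) (dict_list : List (String × String)) (Tasks : List String) :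
    task_sheet_alt users dict_list Tasks = pvSpecGrid users dict_list Tasks := by
  have hts : task_sheet_alt users dict_list Tasks =
      dict_list.foldl (fun g p => pvBbody (pvRowsOf Tasks) (pvColsOf users) g p)
        (Tasks.map (fun _ => List.replicate users.length pvRed)) := rfl
  rw [hts]
  have hok : pvGridOK users Tasks
      (dict_list.foldl (fun g p => pvBbody (pvRowsOf Tasks) (pvColsOf users) g p)
        (Tasks.map (fun _ => List.replicate users.length pvRed))) :=
    pv_foldl_pres (pvGridOK users Tasks) _
      (fun a b ha => pvBbody_gridOK ha b) _ _ (pvGrid0_gridOK users Tasks)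
  apply List.ext_getElem
  · rw [hok.1]; simp [pvSpecGrid]
  · intro r hr1 hr2
    have hrT : r < Tasks.length := hok.1 ▸ hr1
    have hrowlen := hok.2 _ (List.getElem_mem hr1)
    apply List.ext_getElem
    · rw [hrowlen]; simp [pvSpecGrid, hrT]
    · intro c hc1 hc2
      have hcU : c < users.length := hrowlen ▸ hc1
      rw [← pv_cell_eq_getElem hr1 hc1,
        pvBfold_cell hrT hcU dict_list _ (pvGrid0_gridOK users Tasks),
        pvGrid0_cell hrT hcU]
      simp [pvSpecGrid]

-- ===== VERDICT (by name: the statement is the Claim_ definition above) =====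
theorem task_sheet_spec : Claim_equal_task_sheet := by
  intro users dict_list Tasks _ _
  unfold Spec_task_sheet
  rw [pvLA, pvLB]

@[simp] theorem task_sheet_raises : Claim_raises_task_sheet := by
  unfold Claim_raises_task_sheet
  constructor
  · intro users dict_list Tasks _ hR hP
    rcases hR with ⟨hne, p, hp, hu, hbad⟩
    rcases hP with h0 | hall
    · exact hne h0
    · rcases hall p hp hu with ⟨h1, h2⟩
      rcases hbad with h | h
      · exact h1 h
      · exact h h2
  · exact ⟨by decide, by decide, by decide⟩
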